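-- pv_equiv track=rewrite | github.com/votingworks/arlo | server/audit_math/raire_utils.py | vote_for_cand
-- ===== SOURCE A (Python) =====
-- from typing import Type, Callable, Dict, List, Any, Optional, Literal, Set, TypedDict
--
-- def ranking(cand: str, ballot: Dict[str, int]) -> int:
--     """
--     Input:
--         cand : string  -   identifier for candidate
--         ballot :       -   mapping between candidate name and their
--                            position in the ranking for a relevant contest
--                            on a given ballot.
--
--     Output:
--         Returns the position of candidate 'cand' in the ranking of the
--         given ballot 'ballot'. Returns -1 if 'cand' is not preferenced on the
--         ballot.
--     """
--     return ballot.get(cand, 0)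
--
-- def vote_for_cand(
--     cand: str, eliminated: Set[str], ballot: Dict[str, int]
-- ) -> Literal[0, 1]:
--     """
--     Input:
--         cand : string       -   identifier for candidate
--         eliminated : list   -   identifiers of eliminated candidates
--         ballot : CB         -   mapping between candidate name and their
--                                 position in the ranking for a relevant contest
--                                 on a given ballot.
--     Output:
--         Returns 1 if the given 'ballot' is a vote for the given candidate 'cand'
--         in the context where candidates in 'eliminated' have been eliminated.
--         Otherwise, return 0 as the 'ballot' is not a vote for 'cand'.
--     """
--     # If 'cand' is not in the set of candidates assumed still standing,
--     # 'cand' does not get this vote.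
--     if cand in eliminated:
--         return 0
--
--     # If 'cand' does not appear on the ballot, they do not get this vote.
--     c_idx = ranking(cand, ballot)
--     if not c_idx:
--         return 0
--
--     for alt_c, a_idx in ballot.items():
--         if alt_c == cand:
--             continue
--
--         if alt_c in eliminated:
--             continue
--
--         if a_idx and a_idx < c_idx:
--             return 0
--
--     return 1
-- ===== SOURCE B (Python) =====
-- def vote_for_cand(cand, eliminated, ballot):
--     # Sort the surviving (nonzero-ranked, non-eliminated) entries by rank and
--     # scan the leading tie-block: the ballot is a vote for cand iff cand sits
--     # in the block of minimal rank.  No separate guards for "cand eliminated"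
--     # or "cand unranked" are needed: such a cand never appears in `standing`.
--     standing = sorted(((idx, c) for c, idx in ballot.items()
--                        if idx and c not in eliminated),
--                       key=lambda e: e[0])
--     if not standing:
--         return 0
--     top = standing[0][0]
--     for idx, c in standing:
--         if idx != top:
--             return 0
--         if c == cand:
--             return 1
--     return 0
-- ===== Notes on version B (the rewrite author's own statement) =====
-- stated objective: alternative
-- what changed: B replaces A's guard-then-early-exit rival scan by a sort-then-scan algorithm: it sorts the surviving nonzero-ranked entries by rank and walks the leading tie-block looking for cand, needing no separate 'cand eliminated' or 'cand unranked' guards.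
import Mathlib
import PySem

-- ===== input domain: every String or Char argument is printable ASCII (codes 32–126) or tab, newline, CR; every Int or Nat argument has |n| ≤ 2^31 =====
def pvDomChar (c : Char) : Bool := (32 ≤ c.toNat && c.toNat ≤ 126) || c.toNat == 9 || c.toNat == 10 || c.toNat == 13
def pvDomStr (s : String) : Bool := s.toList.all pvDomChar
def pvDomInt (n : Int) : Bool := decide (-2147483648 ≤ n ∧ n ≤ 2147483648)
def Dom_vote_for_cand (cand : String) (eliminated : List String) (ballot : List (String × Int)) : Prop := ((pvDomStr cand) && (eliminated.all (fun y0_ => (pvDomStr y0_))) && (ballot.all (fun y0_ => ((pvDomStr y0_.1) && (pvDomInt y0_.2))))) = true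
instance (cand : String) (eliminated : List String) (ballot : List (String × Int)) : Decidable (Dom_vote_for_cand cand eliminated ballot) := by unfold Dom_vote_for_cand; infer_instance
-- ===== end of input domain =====

-- B replaces A's guard-then-early-exit rival scan by sort-then-scan: sort the surviving
-- nonzero-ranked entries by rank and look for cand in the leading tie-block (alternative structure, not faster).

-- ===== PORT A =====
-- ranking(cand, ballot) = ballot.get(cand, 0)
def ranking (cand : String) (ballot : List (String × Int)) : Int :=
  PySem.Dict.getD (PySem.Dict.mk ballot) cand 0

-- the `for alt_c, a_idx in ballot.items(): …` loop of A, with its early return 0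
def vfcLoop (cand : String) (eliminated : List String) (c_idx : Int) :
    List (String × Int) → Int
  | [] => 1
  | (alt_c, a_idx) :: rest =>
    if alt_c == cand then vfcLoop cand eliminated c_idx rest
    else if eliminated.contains alt_c then vfcLoop cand eliminated c_idx rest
    else if a_idx ≠ 0 ∧ a_idx < c_idx then 0
    else vfcLoop cand eliminated c_idx rest

def vote_for_cand (cand : String) (eliminated : List String) (ballot : List (String × Int)) : Int :=
  if eliminated.contains cand then 0
  else
    let c_idx := ranking cand ballot
    if c_idx = 0 then 0
    else vfcLoop cand eliminated c_idx ballot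

-- ===== PORT B =====
-- the `for idx, c in standing: …` loop of B (top = standing[0][0])
def tieScan (cand : String) (top : Int) : List (Int × String) → Int
  | [] => 0
  | (idx, c) :: rest =>
    if idx ≠ top then 0
    else if c = cand then 1
    else tieScan cand top rest

def vote_for_cand_alt (cand : String) (eliminated : List String) (ballot : List (String × Int)) : Int :=
  -- standing = sorted(((idx, c) for c, idx in ballot.items() if idx and c not in eliminated), key=lambda e: e[0])
  let standing := PySem.List.sorted
    (ballot.filterMap (fun p =>
      if p.2 ≠ 0 ∧ eliminated.contains p.1 = false then some (p.2, p.1) else none))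
    (fun e => e.1)
  match standing with
  | [] => 0
  | (top, _) :: _ => tieScan cand top standing

-- ===== PRECONDITION & SPEC =====
-- Pre_ requires the ballot's keys to be distinct: the parameter is a Python dict, whose keys
-- are unique by construction, so duplicate-key association lists do not represent any Python input.
def Pre_vote_for_cand (cand : String) (eliminated : List String) (ballot : List (String × Int)) : Prop :=
  (ballot.map Prod.fst).Nodup
instance (cand : String) (eliminated : List String) (ballot : List (String × Int)) : Decidable (Pre_vote_for_cand cand eliminated ballot) := by unfold Pre_vote_for_cand; infer_instance

def pvWitness_vote_for_cand : String × List String × (List (String × Int)) :=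
  ("a", ["b"], [("a", 1), ("c", 2)])

def Spec_vote_for_cand (cand : String) (eliminated : List String) (ballot : List (String × Int)) (out : Int) : Prop := out = vote_for_cand_alt cand eliminated ballot
instance (cand : String) (eliminated : List String) (ballot : List (String × Int)) (out : Int) : Decidable (Spec_vote_for_cand cand eliminated ballot out) := by unfold Spec_vote_for_cand; infer_instance

-- ===== CLAIM (what is proved, stated in full; the proofs are below) =====
def Claim_equal_vote_for_cand : Prop := ∀ (cand : String) (eliminated : List String) (ballot : List (String × Int)), Dom_vote_for_cand cand eliminated ballot → Pre_vote_for_cand cand eliminated ballot → Spec_vote_for_cand cand eliminated ballot (vote_for_cand cand eliminated ballot)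

-- ===== LEMMAS AND PROOFS =====

-- A's loop returns 1 exactly when no surviving rival with a nonzero rank beats c_idx.
theorem vfcLoop_eq (cand : String) (eliminated : List String) (c : Int)
    (l : List (String × Int)) :
    vfcLoop cand eliminated c l =
      if (∀ p ∈ l, (p.2 ≠ 0 ∧ p.1 ≠ cand ∧ eliminated.contains p.1 = false) → c ≤ p.2)
      then 1 else 0 := by
  induction l with
  | nil => simp [vfcLoop]
  | cons hd tl ih =>
    obtain ⟨a, i⟩ := hd
    simp only [vfcLoop]
    by_cases h1 : a = cand
    · rw [if_pos (by simp [h1]), ih]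
      apply if_congr _ rfl rfl
      constructor
      · intro h
        rw [List.forall_mem_cons]
        exact ⟨fun hc => (hc.2.1 h1).elim, h⟩
      · exact fun h p hp => h p (List.mem_cons_of_mem _ hp)
    · rw [if_neg (by simp [h1])]
      by_cases h2 : eliminated.contains a = true
      · rw [if_pos h2, ih]
        apply if_congr _ rfl rfl
        constructor
        · intro h
          rw [List.forall_mem_cons]
          refine ⟨fun hc => ?_, h⟩
          rw [hc.2.2] at h2; exact absurd h2 (by simp)
        · exact fun h p hp => h p (List.mem_cons_of_mem _ hp)
      · rw [if_neg h2]
        by_cases h3 : i ≠ 0 ∧ i < c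
        · rw [if_pos h3, eq_comm, if_neg]
          intro h
          have := h (a, i) (List.mem_cons_self) ⟨h3.1, h1, by simpa using h2⟩
          omega
        · rw [if_neg h3, ih]
          apply if_congr _ rfl rfl
          constructor
          · intro h
            rw [List.forall_mem_cons]
            refine ⟨fun hc => ?_, h⟩
            have hi := hc.1
            simp only [not_and, not_lt, ne_eq] at h3
            exact h3 hi
          · exact fun h p hp => h p (List.mem_cons_of_mem _ hp)

-- B's tie-block scan, characterised: on a rank-sorted list whose ranks are all ≥ top,
-- it returns 1 exactly when some entry of rank top carries cand.
theorem tieScan_eq (cand : String) (top : Int) (s : List (Int × String))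
    (hs : s.Pairwise (fun a b => a.1 ≤ b.1)) (hlo : ∀ p ∈ s, top ≤ p.1) :
    tieScan cand top s =
      if (∃ p ∈ s, p.1 = top ∧ p.2 = cand) then 1 else 0 := by
  induction s with
  | nil => simp [tieScan]
  | cons hd tl ih =>
    obtain ⟨r, c⟩ := hd
    simp only [tieScan]
    by_cases h1 : r ≠ top
    · rw [if_pos h1, eq_comm, if_neg]
      rintro ⟨p, hp, hpt, -⟩
      rcases List.mem_cons.mp hp with rfl | hp'
      · exact h1 hpt
      · have hr : top ≤ r := hlo (r, c) List.mem_cons_self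
        have := (List.pairwise_cons.mp hs).1 p hp'
        have := hpt
        simp_all
        omega
    · have h1' : r = top := not_not.mp h1
      subst h1'
      rw [if_neg (by simp)]
      by_cases h2 : c = cand
      · rw [if_pos h2]
        exact (if_pos ⟨(r, c), List.mem_cons_self, rfl, h2⟩).symm
      · rw [if_neg h2,
          ih (List.pairwise_cons.mp hs).2 (fun p hp => hlo p (List.mem_cons_of_mem _ hp))]
        apply if_congr _ rfl rfl
        constructor
        · rintro ⟨p, hp, hpt, hpc⟩
          exact ⟨p, List.mem_cons.mpr (Or.inr hp), hpt, hpc⟩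
        · rintro ⟨p, hp, hpt, hpc⟩
          rcases List.mem_cons.mp hp with rfl | hp'
          · exact absurd hpc h2
          · exact ⟨p, hp', hpt, hpc⟩

-- membership in B's pre-sort survivor list
theorem mem_standing (cand : String) (eliminated : List String)
    (ballot : List (String × Int)) (q : Int × String) :
    q ∈ ballot.filterMap (fun p =>
        if p.2 ≠ 0 ∧ eliminated.contains p.1 = false then some (p.2, p.1) else none)
      ↔ (q.2, q.1) ∈ ballot ∧ q.1 ≠ 0 ∧ eliminated.contains q.2 = false := by
  rw [List.mem_filterMap]
  constructor
  · rintro ⟨p, hp, hq⟩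
    by_cases hc : p.2 ≠ 0 ∧ eliminated.contains p.1 = false
    · rw [if_pos hc] at hq
      have h := Option.some.inj hq
      subst h
      exact ⟨hp, hc⟩
    · rw [if_neg hc] at hq
      cases hq
  · rintro ⟨hm, h0, he⟩
    refine ⟨(q.2, q.1), hm, ?_⟩
    rw [if_pos ⟨h0, he⟩]

-- with distinct keys, a lookup value is exactly the unique entry for that key
theorem getD_mk_of_nodup (ballot : List (String × Int)) (k : String) (v : Int)
    (hnd : (ballot.map Prod.fst).Nodup) :
    (k, v) ∈ ballot → PySem.Dict.getD (PySem.Dict.mk ballot) k 0 = v := by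
  intro hm
  have hkeys : (PySem.Dict.mk ballot).keys.Nodup := by
    simpa [PySem.Dict.keys] using hnd
  have hitems : (k, v) ∈ (PySem.Dict.mk ballot).items := by simpa using hm
  exact PySem.Dict.getD_of_mem_items (PySem.Dict.mk ballot) hitems hkeys 0

theorem get?_mk_of_getD_ne (ballot : List (String × Int)) (k : String)
    (h : PySem.Dict.getD (PySem.Dict.mk ballot) k 0 ≠ 0) :
    (k, PySem.Dict.getD (PySem.Dict.mk ballot) k 0) ∈ ballot := by
  rw [PySem.Dict.getD_eq_get?_getD] at h ⊢
  cases hg : (PySem.Dict.mk ballot).get? k with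
  | none => rw [hg] at h; simp at h
  | some v =>
    have hmem := PySem.Dict.mem_items_of_get?_eq_some (PySem.Dict.mk ballot) hg
    simpa [hg] using hmem

-- B, characterised: 1 exactly when some minimal-rank surviving entry carries cand
theorem alt_eq (cand : String) (eliminated : List String) (ballot : List (String × Int)) :
    vote_for_cand_alt cand eliminated ballot =
      (if ∃ q ∈ ballot.filterMap (fun p =>
            if p.2 ≠ 0 ∧ eliminated.contains p.1 = false then some (p.2, p.1) else none),
          q.2 = cand ∧ ∀ p ∈ ballot.filterMap (fun p =>
            if p.2 ≠ 0 ∧ eliminated.contains p.1 = false then some (p.2, p.1) else none), q.1 ≤ p.1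
        then 1 else 0) := by
  unfold vote_for_cand_alt
  set F := ballot.filterMap (fun p =>
      if p.2 ≠ 0 ∧ eliminated.contains p.1 = false then some (p.2, p.1) else none) with hF
  have hmemS : ∀ q : Int × String, (q ∈ PySem.List.sorted F (fun e : Int × String => e.1)) ↔ q ∈ F :=
    fun q => PySem.List.mem_sorted F (fun e : Int × String => e.1) false q
  cases hS : PySem.List.sorted F (fun e : Int × String => e.1) with
  | nil =>
    have hFnil : F = [] :=
      ((hS ▸ PySem.List.sorted_perm F (fun e : Int × String => e.1) false).symm).eq_nil
    show (0 : Int) = if ∃ q ∈ F, q.2 = cand ∧ ∀ p ∈ F, q.1 ≤ p.1 then 1 else 0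
    rw [eq_comm, if_neg]
    rintro ⟨q, hq, -⟩
    rw [hFnil] at hq
    exact absurd hq (List.not_mem_nil)
  | cons hd tl =>
    obtain ⟨top, c0⟩ := hd
    have htople : ∀ y ∈ F, top ≤ y.1 :=
      fun y hy => PySem.List.key_head_sorted_le F (fun e : Int × String => e.1) hS y hy
    have hsorted := PySem.List.sorted_pairwise F (fun e : Int × String => e.1)
    rw [hS] at hsorted
    show tieScan cand top ((top, c0) :: tl) = _
    rw [tieScan_eq cand top _ hsorted
      (fun p hp => htople p ((hmemS p).mp (hS ▸ hp)))]
    apply if_congr _ rfl rfl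
    constructor
    · rintro ⟨p, hp, hpt, hpc⟩
      refine ⟨p, (hmemS p).mp (hS ▸ hp), hpc, fun q hq => ?_⟩
      rw [hpt]; exact htople q hq
    · rintro ⟨q, hqF, hqc, hqmin⟩
      refine ⟨q, hS ▸ (hmemS q).mpr hqF, ?_, hqc⟩
      have h1 : top ≤ q.1 := htople q hqF
      have h2 : q.1 ≤ top :=
        hqmin (top, c0) ((hmemS (top, c0)).mp (by rw [hS]; exact List.mem_cons_self))
      omega

-- ===== VERDICT (by name: the statement is the Claim_ definition above) =====
theorem vote_for_cand_spec : Claim_equal_vote_for_cand := by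
  intro cand eliminated ballot _ hpre
  unfold Spec_vote_for_cand vote_for_cand ranking
  rw [alt_eq]
  set F := ballot.filterMap (fun p =>
      if p.2 ≠ 0 ∧ eliminated.contains p.1 = false then some (p.2, p.1) else none) with hF
  by_cases hCB : ∃ q ∈ F, q.2 = cand ∧ ∀ p ∈ F, q.1 ≤ p.1
  · -- a minimal-rank surviving entry carries cand: both return 1
    rw [if_pos hCB]
    obtain ⟨q, hqF, hname, hmin⟩ := hCB
    obtain ⟨hmem, hr0, helim⟩ := (mem_standing cand eliminated ballot q).mp hqF
    rw [hname] at hmem helim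
    have hc : PySem.Dict.getD (PySem.Dict.mk ballot) cand 0 = q.1 :=
      getD_mk_of_nodup ballot cand q.1 hpre hmem
    rw [if_neg (by rw [helim]; exact Bool.false_ne_true), hc, if_neg hr0, vfcLoop_eq, if_pos]
    intro p hp hc'
    exact hmin (p.2, p.1) ((mem_standing cand eliminated ballot (p.2, p.1)).mpr
      ⟨hp, hc'.1, hc'.2.2⟩)
  · -- no such entry: both return 0
    rw [if_neg hCB]
    by_cases h1 : eliminated.contains cand
    · rw [if_pos h1]
    · rw [if_neg h1]
      by_cases h2 : PySem.Dict.getD (PySem.Dict.mk ballot) cand 0 = 0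
      · simp [h2]
      · simp only [if_neg h2]
        rw [vfcLoop_eq, if_neg]
        intro hall
        apply hCB
        set c := PySem.Dict.getD (PySem.Dict.mk ballot) cand 0 with hc
        have hmem : (cand, c) ∈ ballot := get?_mk_of_getD_ne ballot cand h2
        refine ⟨(c, cand), (mem_standing cand eliminated ballot (c, cand)).mpr
          ⟨hmem, h2, by simpa using h1⟩, rfl, ?_⟩
        intro p hp
        obtain ⟨hpm, hp0, hpe⟩ := (mem_standing cand eliminated ballot p).mp hp
        by_cases hpc : p.2 = cand
        · -- same key: distinct keys force the same value
          have hv : PySem.Dict.getD (PySem.Dict.mk ballot) cand 0 = p.1 :=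
            getD_mk_of_nodup ballot cand p.1 hpre (by rw [← hpc]; exact hpm)
          exact le_of_eq (hc.trans hv)
        · exact hall (p.2, p.1) hpm ⟨hp0, hpc, hpe⟩
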